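-- pv_equiv track=rewrite | github.com/devwuu/coding-test | lecture/main7.py | my_solution_1
-- ===== SOURCE A (Python) =====
-- def my_solution_1(nums):
--     answer = -1
--
--     table = dict()
--
--     for num in nums:
--         table[num] = 1 if table.get(num) is None else table[num] + 1
--
--     for key, value in table.items():
--         if value == 1:
--             answer = max(key, answer)
--
--     return answer
-- ===== SOURCE B (Python) =====
-- def my_solution_1(nums):
--     answer = -1
--     s = sorted(nums)
--     i = 0
--     n = len(s)
--     while i < n:
--         j = i + 1
--         while j < n and s[j] == s[i]:
--             j += 1
--         if j == i + 1:
--             answer = max(answer, s[i])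
--         i = j
--     return answer
-- ===== Notes on version B (the rewrite author's own statement) =====
-- stated objective: alternative
-- what changed: Replaces the dict frequency table plus items scan by sorting a copy of the list and scanning consecutive runs, taking max over values whose run has length exactly 1.
import Mathlib
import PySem

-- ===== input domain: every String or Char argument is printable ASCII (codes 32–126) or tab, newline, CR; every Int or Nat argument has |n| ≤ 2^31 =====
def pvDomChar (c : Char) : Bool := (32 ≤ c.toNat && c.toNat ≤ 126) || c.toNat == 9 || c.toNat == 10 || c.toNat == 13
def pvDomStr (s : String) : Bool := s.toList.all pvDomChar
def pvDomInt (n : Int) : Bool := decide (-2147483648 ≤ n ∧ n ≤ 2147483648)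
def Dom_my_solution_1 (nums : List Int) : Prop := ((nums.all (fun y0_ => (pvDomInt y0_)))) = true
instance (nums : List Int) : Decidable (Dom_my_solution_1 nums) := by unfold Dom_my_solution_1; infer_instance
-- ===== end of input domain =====

-- B replaces A's dict frequency table by sorting a copy of the list and scanning
-- consecutive runs, taking the max over values whose run has length exactly 1
-- (objective: alternative algorithm of similar cost).


-- ===== PORT A =====
def my_solution_1 (nums : List Int) : Int :=
  let table : PySem.Dict Int Int :=
    nums.foldl (fun table num =>
      table.insert num (match table.get? num with
        | none => 1
        | some v => v + 1)) PySem.Dict.empty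
  table.items.foldl (fun answer kv =>
    if kv.2 == (1 : Int) then max kv.1 answer else answer) (-1)

-- ===== PORT B =====
-- outer while loop of Source B: one step per run of equal values in the sorted list
def runScan : List Int → Int → Int
  | [], answer => answer
  | x :: rest, answer =>
    runScan (rest.dropWhile (fun y => y == x))
      (if (rest.takeWhile (fun y => y == x)).isEmpty then max answer x else answer)
termination_by s _ => s.length
decreasing_by simpa using Nat.lt_succ_of_le (List.length_dropWhile_le _ _)

def my_solution_1_alt (nums : List Int) : Int :=
  runScan (PySem.List.sorted nums (fun x => x) false) (-1)

-- ===== PRECONDITION & SPEC =====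
def Spec_my_solution_1 (nums : List Int) (out : Int) : Prop := out = my_solution_1_alt nums
instance (nums : List Int) (out : Int) : Decidable (Spec_my_solution_1 nums out) := by unfold Spec_my_solution_1; infer_instance

-- ===== CLAIM (what is proved, stated in full; the proofs are below) =====
def Claim_equal_my_solution_1 : Prop := ∀ (nums : List Int), Dom_my_solution_1 nums → Spec_my_solution_1 nums (my_solution_1 nums)

-- ===== LEMMAS AND PROOFS =====

-- a fold that skips elements failing p is a fold over the filtered list
theorem foldl_if_filter {α β : Type} (p : α → Bool) (f : β → α → β) :
    ∀ (l : List α) (a : β),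
      l.foldl (fun acc x => if p x then f acc x else acc) a = (l.filter p).foldl f a := by
  intro l
  induction l with
  | nil => intro a; rfl
  | cons x t ih =>
    intro a
    by_cases h : p x = true
    · simp [h, ih]
    · simp only [Bool.not_eq_true] at h
      simp [h, ih]

-- A's table-building loop is the counter loop
theorem table_eq_counter (nums : List Int) :
    nums.foldl (fun table num =>
      table.insert num (match table.get? num with
        | none => 1
        | some v => v + 1)) PySem.Dict.empty = PySem.Dict.counter nums := by
  rw [← PySem.Dict.foldl_insert_getD_add_one_eq_counter]
  congr 1
  funext t num
  rcases h : t.get? num with _ | v <;>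
    simp [PySem.Dict.getD_eq_get?_getD, h]

-- A computes the max-fold over the distinct values of count 1 (first-occurrence order)
theorem my_solution_1_eq (nums : List Int) :
    my_solution_1 nums =
      ((PySem.Set.ofList nums).filter (fun k => nums.count k == 1)).foldl
        (fun a k => max a k) (-1) := by
  show (nums.foldl _ PySem.Dict.empty).items.foldl _ (-1) = _
  rw [table_eq_counter, PySem.Dict.items_counter, List.foldl_map]
  have hfun : (fun (answer : Int) (k : Int) =>
      if ((nums.count k : Int) == (1:Int)) then max k answer else answer)
      = fun answer k => if (nums.count k == 1 : Bool) then max answer k else answer := by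
    funext a k
    have : ((nums.count k : Int) == (1:Int)) = (nums.count k == 1) := by
      simp
    rw [this, max_comm]
  rw [hfun, foldl_if_filter]

-- every element of the part dropped by the run scan differs from the run's value
theorem ne_of_mem_dropWhile {x z : Int} {rest : List Int}
    (hp : (x :: rest).Pairwise (· ≤ ·))
    (hz : z ∈ rest.dropWhile (fun y => y == x)) : z ≠ x := by
  set d := rest.dropWhile (fun y => y == x) with hd
  have hdsub : d.Sublist rest := List.dropWhile_sublist _
  have hdpw : d.Pairwise (· ≤ ·) := List.Pairwise.sublist hdsub (List.Pairwise.of_cons hp)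
  rcases d with _ | ⟨y, tail⟩
  · simp at hz
  · have hyx : (y == x) = false := by
      have := List.head_dropWhile_not (fun y => y == x) (l := rest)
        (by rw [← hd]; simp)
      simpa [← hd] using this
    have hyne : y ≠ x := by simpa using hyx
    have hxy : x ≤ y := by
      have hymem : y ∈ rest := hdsub.mem (by simp)
      exact List.rel_of_pairwise_cons hp hymem
    have hxlt : x < y := lt_of_le_of_ne hxy (fun h => hyne h.symm)
    rcases List.mem_cons.mp hz with h | h
    · exact h ▸ hyne
    · have : y ≤ z := List.rel_of_pairwise_cons hdpw h
      exact fun hzx => absurd (hzx ▸ this) (not_le.mpr hxlt)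

-- the run scan over a sorted list is the max-fold over its count-1 values
theorem runScan_sorted :
    ∀ (n : Nat) (s : List Int), s.length ≤ n → s.Pairwise (· ≤ ·) → ∀ (acc : Int),
      runScan s acc = (s.filter (fun k => s.count k == 1)).foldl (fun a k => max a k) acc := by
  intro n
  induction n with
  | zero =>
    intro s hlen _ acc
    have : s = [] := List.eq_nil_of_length_eq_zero (Nat.le_zero.mp hlen)
    subst this; simp [runScan]
  | succ n ih =>
    intro s hlen hpw acc
    rcases s with _ | ⟨x, rest⟩
    · simp [runScan]
    · set run := rest.takeWhile (fun y => y == x) with hrun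
      set d := rest.dropWhile (fun y => y == x) with hd
      have hsplit : run ++ d = rest := List.takeWhile_append_dropWhile
      have hrunx : ∀ y ∈ run, y = x := by
        intro y hy
        have := List.mem_takeWhile_imp hy
        simpa using this
      have hdne : ∀ z ∈ d, z ≠ x := fun z hz => ne_of_mem_dropWhile hpw hz
      have hxnd : x ∉ d := fun h => (hdne x h) rfl
      -- counts
      have hcx : (x :: rest).count x = 1 + run.length := by
        have h1 : run.count x = run.length :=
          List.count_eq_length.mpr (fun b hb => (hrunx b hb).symm)
        have h2 : d.count x = 0 := List.count_eq_zero.mpr hxnd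
        rw [← hsplit]
        simp [List.count_append, h1, h2]
        omega
      have hcd : ∀ z ∈ d, (x :: rest).count z = d.count z := by
        intro z hz
        have hzx : z ≠ x := hdne z hz
        have h1 : run.count z = 0 := by
          refine List.count_eq_zero.mpr (fun h => hzx (hrunx z h))
        rw [← hsplit]
        simp [List.count_cons, List.count_append, h1]
        exact Ne.symm hzx
      -- the filtered list decomposes along the runs
      have hruneq : run.filter (fun k => (x :: rest).count k == 1) = [] := by
        refine List.filter_eq_nil_iff.mpr (fun y hy => ?_)
        have hyx : y = x := hrunx y hy
        subst hyx
        have : run ≠ [] := by intro h; rw [h] at hy; simp at hy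
        have hlenpos : 0 < run.length := List.length_pos_iff.mpr this
        simp [hcx]; omega
      have hdeq : d.filter (fun k => (x :: rest).count k == 1)
          = d.filter (fun k => d.count k == 1) := by
        refine List.filter_congr (fun z hz => ?_)
        rw [hcd z hz]
      have hfilter : (x :: rest).filter (fun k => (x :: rest).count k == 1)
          = (if run.isEmpty then [x] else []) ++ d.filter (fun k => d.count k == 1) := by
        rw [show (x :: rest).filter (fun k => (x :: rest).count k == 1)
              = (x :: (run ++ d)).filter (fun k => (x :: rest).count k == 1) by rw [hsplit]]
        rw [List.filter_cons, List.filter_append, hruneq, hdeq]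
        by_cases hre : run = []
        · have hc1 : ((x :: rest).count x == 1) = true := by
            rw [hcx, hre]; simp
          rw [hc1, hre]; simp
        · have hlenpos : 0 < run.length := List.length_pos_iff.mpr hre
          have hc1 : ((x :: rest).count x == 1) = false := by
            rw [hcx]; simpa using (by omega : ¬ 1 + run.length = 1)
          rw [hc1]; simp [List.isEmpty_iff, hre]
      -- inductive step
      have hdlen : d.length ≤ n := by
        have h1 : d.length ≤ rest.length := List.length_dropWhile_le _ _
        have h2 : rest.length ≤ n := by simpa using Nat.le_of_succ_le_succ hlen
        omega
      have hdpw : d.Pairwise (· ≤ ·) :=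
        List.Pairwise.sublist (List.dropWhile_sublist _) (List.Pairwise.of_cons hpw)
      have hstep : runScan (x :: rest) acc
          = runScan d (if run.isEmpty then max acc x else acc) := by
        rw [runScan]
      rw [hstep, ih d hdlen hdpw, hfilter]
      by_cases hre : run = []
      · simp [hre]
      · simp [List.isEmpty_iff, hre]

-- count-1 values of a list form a Nodup list after filtering
theorem nodup_filter_count_one (s : List Int) :
    (s.filter (fun k => s.count k == 1)).Nodup := by
  refine List.nodup_iff_count_le_one.mpr (fun a => ?_)
  by_cases h : (List.count a s == 1) = true
  · have hc := List.count_filter (p := fun k => List.count k s == 1) (l := s) (a := a) h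
    rw [hc]
    exact Nat.le_of_eq (by simpa using h)
  · have : a ∉ s.filter (fun k => List.count k s == 1) := by
      intro hmem
      exact h (List.mem_filter.mp hmem).2
    simp [List.count_eq_zero.mpr this]

theorem rightCommutative_max : RightCommutative (fun (a k : Int) => max a k) :=
  ⟨fun b a₁ a₂ => by rw [max_assoc, max_comm a₁ a₂, ← max_assoc]⟩

theorem my_solution_1_alt_eq (nums : List Int) :
    my_solution_1_alt nums =
      ((PySem.List.sorted nums (fun x => x) false).filter
        (fun k => (PySem.List.sorted nums (fun x => x) false).count k == 1)).foldl
        (fun a k => max a k) (-1) := by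
  unfold my_solution_1_alt
  exact runScan_sorted _ _ le_rfl (PySem.List.sorted_pairwise nums (fun x => x)) (-1)

-- ===== VERDICT (by name: the statement is the Claim_ definition above) =====
theorem my_solution_1_spec : Claim_equal_my_solution_1 := by
  intro nums _
  unfold Spec_my_solution_1
  rw [my_solution_1_eq, my_solution_1_alt_eq]
  set s := PySem.List.sorted nums (fun x => x) false with hs
  have hperm : s.Perm nums := PySem.List.sorted_perm nums (fun x => x) false
  have hcnt : ∀ k, s.count k = nums.count k := fun k => hperm.count_eq k
  have hps : (fun k => s.count k == 1) = (fun k => nums.count k == 1) := by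
    funext k; rw [hcnt]
  rw [hps]
  refine List.Perm.foldl_eq (rcomm := rightCommutative_max) ?_ (-1)
  refine (List.perm_ext_iff_of_nodup
    ((PySem.Set.nodup_ofList nums).filter _)
    (by have := nodup_filter_count_one s; rwa [hps] at this)).mpr (fun a => ?_)
  simp only [List.mem_filter, PySem.Set.mem_ofList]
  constructor
  · rintro ⟨ha, hc⟩; exact ⟨hperm.mem_iff.mpr ha, hc⟩
  · rintro ⟨ha, hc⟩; exact ⟨hperm.mem_iff.mp ha, hc⟩
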